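-- pv_equiv track=rewrite | github.com/sergioB79/nhl-dashboard-vercel | app.py | compute_streak
-- ===== SOURCE A (Python) =====
-- def compute_streak(results):
--     """Recebe lista de 'W'/'L' e devolve '+N' ou '-N'."""
--     if not results:
--         return ""
--     last = results[-1]
--     count = 0
--     for r in reversed(results):
--         if r == last:
--             count += 1
--         else:
--             break
--     sign = "+" if last == "W" else "-"
--     return f"{sign}{count}"
-- ===== SOURCE B (Python) =====
-- def compute_streak(results):
--     """Recebe lista de 'W'/'L' e devolve '+N' ou '-N'."""
--     if not results:
--         return ""
--     runs = []
--     for r in results: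
--         if runs and runs[-1][0] == r:
--             runs[-1] = (r, runs[-1][1] + 1)
--         else:
--             runs.append((r, 1))
--     k, n = runs[-1]
--     return ("+" if k == "W" else "-") + str(n)
-- ===== Notes on version B (the rewrite author's own statement) =====
-- stated objective: alternative
-- what changed: Replaces the backward scan with early break by a forward single-pass run-length encoding of the whole list, returning the last run's sign and length.
import Mathlib
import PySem

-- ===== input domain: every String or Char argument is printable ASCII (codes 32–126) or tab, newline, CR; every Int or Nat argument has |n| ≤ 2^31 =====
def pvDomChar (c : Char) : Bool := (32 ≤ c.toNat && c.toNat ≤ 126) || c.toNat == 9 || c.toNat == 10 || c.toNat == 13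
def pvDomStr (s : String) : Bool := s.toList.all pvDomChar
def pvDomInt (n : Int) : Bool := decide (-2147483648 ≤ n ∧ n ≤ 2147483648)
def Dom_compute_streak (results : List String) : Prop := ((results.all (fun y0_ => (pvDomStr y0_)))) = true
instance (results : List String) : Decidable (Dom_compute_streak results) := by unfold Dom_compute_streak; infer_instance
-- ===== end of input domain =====

-- B replaces A's backward scan-with-break by a forward single-pass run-length encoding (alternative decomposition, no speed claim).

-- ===== PORT A =====
-- A's 'for r in reversed(results): if r == last: count += 1 else: break'
def streakLoop (last : String) : List String → Int → Int
  | [], count => count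
  | r :: rest, count => if r = last then streakLoop last rest (count + 1) else count

def compute_streak (results : List String) : String :=
  if results = [] then ""
  else
    match PySem.List.pyGet? results (-1) with
    | none => ""   -- unreachable: results is nonempty
    | some last =>
      let count := streakLoop last results.reverse 0
      let sign := if last = "W" then "+" else "-"
      sign ++ PySem.Int.toStr count

-- ===== PORT B =====
-- one step of B's forward loop building run-length pairs (runs[-1] update / append)
def rleStep (runs : List (String × Int)) (r : String) : List (String × Int) :=
  match runs.getLast? with
  | some (k, n) => if k = r then runs.dropLast ++ [(r, n + 1)] else runs ++ [(r, 1)]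
  | none => [(r, 1)]

def compute_streak_alt (results : List String) : String :=
  if results = [] then ""
  else
    match (results.foldl rleStep []).getLast? with
    | some (k, n) => (if k = "W" then "+" else "-") ++ PySem.Int.toStr n
    | none => ""   -- unreachable: runs is nonempty for nonempty input

-- ===== PRECONDITION & SPEC =====
def Spec_compute_streak (results : List String) (out : String) : Prop := out = compute_streak_alt results
instance (results : List String) (out : String) : Decidable (Spec_compute_streak results out) := by unfold Spec_compute_streak; infer_instance

-- ===== CLAIM (what is proved, stated in full; the proofs are below) =====
def Claim_equal_compute_streak : Prop := ∀ (results : List String), Dom_compute_streak results → Spec_compute_streak results (compute_streak results)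

-- ===== LEMMAS AND PROOFS =====

-- length of the run of t at the head of xs (the value A's break-loop computes)
def countPrefix (t : String) : List String → Int
  | [] => 0
  | r :: rest => if r = t then 1 + countPrefix t rest else 0

theorem streakLoop_eq (t : String) (xs : List String) (acc : Int) :
    streakLoop t xs acc = acc + countPrefix t xs := by
  induction xs generalizing acc with
  | nil => simp [streakLoop, countPrefix]
  | cons r rest ih =>
    simp only [streakLoop, countPrefix]
    split_ifs with h
    · rw [ih]; ring
    · ring

theorem rleStep_getLast? (runs : List (String × Int)) (y : String) (n : Int) (r : String)
    (h : runs.getLast? = some (y, n)) :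
    (rleStep runs r).getLast? = if y = r then some (r, n + 1) else some (r, 1) := by
  unfold rleStep
  rw [h]
  by_cases hy : y = r <;> simp [hy]

theorem rle_last (xs : List String) (r : String) :
    ((xs ++ [r]).foldl rleStep []).getLast? = some (r, 1 + countPrefix r xs.reverse) := by
  induction xs using List.reverseRecOn generalizing r with
  | nil => simp [rleStep, countPrefix]
  | append_singleton ys y ih =>
    rw [List.foldl_append, List.foldl_cons, List.foldl_nil,
        rleStep_getLast? _ _ _ _ (ih y)]
    simp only [List.reverse_append, List.reverse_singleton, List.singleton_append,
      countPrefix]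
    split_ifs with h
    · subst h; simp; ring
    · simp

-- ===== VERDICT (by name: the statement is the Claim_ definition above) =====
theorem compute_streak_spec : Claim_equal_compute_streak := by
  intro results _
  unfold Spec_compute_streak
  induction results using List.reverseRecOn with
  | nil => rfl
  | append_singleton xs r _ =>
    unfold compute_streak compute_streak_alt
    have hne : xs ++ [r] ≠ [] := by simp
    rw [if_neg hne, if_neg hne, PySem.List.pyGet?_neg_one_append_singleton, rle_last]
    simp [countPrefix, streakLoop_eq]
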